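-- pv_equiv track=rewrite | github.com/kduy12/Programming-Fundamentals-INF509066- | Ex 03/exercises.py | group_of_5
-- ===== SOURCE A (Python) =====
-- def group_of_5(n):
--     res = []
--     for i in range(n):
--         tmp = []
--         for j in range(1, 6):
--             tmp.append(5 * i + j)
--         res.append(tmp)
--     return res
-- ===== SOURCE B (Python) =====
-- def group_of_5(n):
--     flat = list(range(1, 5 * n + 1))
--     return [flat[i:i + 5] for i in range(0, len(flat), 5)]
-- ===== Notes on version B (the rewrite author's own statement) =====
-- stated objective: alternative
-- what changed: Replaces A's nested per-group/per-element append loops by generating one flat list of all 5n integers and then reshaping it into chunks of five via slicing over a step-5 range.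
import Mathlib
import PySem

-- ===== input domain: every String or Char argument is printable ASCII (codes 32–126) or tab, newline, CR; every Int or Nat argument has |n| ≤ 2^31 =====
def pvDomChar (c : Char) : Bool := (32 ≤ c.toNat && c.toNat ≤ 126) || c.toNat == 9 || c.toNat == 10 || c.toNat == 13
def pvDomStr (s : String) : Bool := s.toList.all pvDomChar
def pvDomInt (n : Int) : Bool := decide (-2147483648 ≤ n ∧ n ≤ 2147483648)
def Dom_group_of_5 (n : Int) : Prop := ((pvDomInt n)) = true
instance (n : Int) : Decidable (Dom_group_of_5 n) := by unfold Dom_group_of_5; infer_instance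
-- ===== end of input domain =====

-- B builds the flat list range(1, 5n+1) once and reshapes it into chunks of five by slicing,
-- instead of A's nested outer-group/inner-counter append loops (objective: alternative decomposition).

-- ===== PORT A =====
def group_of_5 (n : Int) : List (List Int) :=
  (PySem.List.pyRange 0 n 1).foldl
    (fun res i =>
      res ++ [(PySem.List.pyRange 1 6 1).foldl (fun tmp j => tmp ++ [5 * i + j]) []])
    []

-- ===== PORT B =====
-- helper of B: the chunking comprehension [flat[i:i+5] for i in range(0, len(flat), 5)]
def pvChunksOf (flat : List Int) : List (List Int) :=
  (PySem.List.pyRange 0 (flat.length : Int) 5).map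
    (fun i => PySem.List.slice flat (some i) (some (i + 5)))

def group_of_5_alt (n : Int) : List (List Int) :=
  pvChunksOf (PySem.List.pyRange 1 (5 * n + 1) 1)

-- ===== PRECONDITION & SPEC =====
def Spec_group_of_5 (n : Int) (out : List (List Int)) : Prop := out = group_of_5_alt n
instance (n : Int) (out : List (List Int)) : Decidable (Spec_group_of_5 n out) := by unfold Spec_group_of_5; infer_instance

-- ===== CLAIM (what is proved, stated in full; the proofs are below) =====
def Claim_equal_group_of_5 : Prop := ∀ (n : Int), Dom_group_of_5 n → Spec_group_of_5 n (group_of_5 n)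

-- ===== LEMMAS AND PROOFS =====

-- the common closed form: group k is [5k+1, …, 5k+5]
def pvChunk (k : Nat) : List Int :=
  [5 * (k : Int) + 1, 5 * (k : Int) + 2, 5 * (k : Int) + 3, 5 * (k : Int) + 4, 5 * (k : Int) + 5]

def pvChunks (m : Nat) : List (List Int) := (List.range m).map pvChunk

lemma groupA_eq (m : Nat) : group_of_5 (m : Int) = pvChunks m := by
  unfold group_of_5 pvChunks
  rw [PySem.List.foldl_append_singleton_eq_map]
  rw [show PySem.List.pyRange 1 6 1 = [1, 2, 3, 4, 5] from rfl]
  rw [PySem.List.pyRange_one 0 (m : Int)]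
  simp only [Int.toNat_natCast, Int.sub_zero, List.map_map, List.foldl_cons, List.foldl_nil, List.nil_append,
    List.cons_append]
  refine List.map_congr_left (fun k _ => ?_)
  simp only [Function.comp_apply, pvChunk]
  ring_nf

lemma slice_chunk (m k : Nat) (hk : k < m) :
    PySem.List.slice (PySem.List.pyRange 1 (5 * (m : Int) + 1) 1)
      (some (5 * (k : Int))) (some (5 * (k : Int) + 5)) =
    [5 * (k : Int) + 1, 5 * k + 2, 5 * k + 3, 5 * k + 4, 5 * k + 5] := by
  have h1 : PySem.List.pyRange 1 (5 * (m : Int) + 1) 1 =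
      PySem.List.pyRange 1 (5 * (k : Int) + 1) 1 ++
      PySem.List.pyRange (5 * (k : Int) + 1) (5 * (m : Int) + 1) 1 :=
    PySem.List.pyRange_one_append 1 (5 * (k : Int) + 1) (5 * (m : Int) + 1)
      (by omega) (by omega)
  have h2 : PySem.List.pyRange (5 * (k : Int) + 1) (5 * (m : Int) + 1) 1 =
      PySem.List.pyRange (5 * (k : Int) + 1) (5 * (k : Int) + 6) 1 ++
      PySem.List.pyRange (5 * (k : Int) + 6) (5 * (m : Int) + 1) 1 :=
    PySem.List.pyRange_one_append _ _ _ (by omega) (by omega)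
  rw [PySem.List.slice_toNat _ (by positivity) (by positivity), h1, h2]
  have hlen1 : (PySem.List.pyRange 1 (5 * (k : Int) + 1) 1).length = 5 * k := by
    rw [PySem.List.length_pyRange_one]; omega
  have hlen2 : (PySem.List.pyRange (5 * (k : Int) + 1) (5 * (k : Int) + 6) 1).length = 5 := by
    rw [PySem.List.length_pyRange_one]; omega
  have hd : (5 * (k : Int)).toNat = 5 * k := by omega
  rw [hd]
  have ht : (5 * (k : Int) + 5).toNat - 5 * k = 5 := by omega
  rw [ht, List.drop_append_of_le_length (by omega),
    List.drop_of_length_le (by omega), List.nil_append,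
    List.take_append_of_le_length (by omega), List.take_of_length_le (by omega)]
  rw [PySem.List.pyRange_one]
  have h6 : (5 * (k : Int) + 6 - (5 * (k : Int) + 1)).toNat = 5 := by omega
  rw [h6]
  simp [List.range_succ]
  ring_nf
  exact ⟨trivial, trivial, trivial, trivial⟩

lemma groupB_eq (m : Nat) : group_of_5_alt (m : Int) = pvChunks m := by
  unfold group_of_5_alt pvChunksOf pvChunks
  have hlen : (PySem.List.pyRange 1 (5 * (m : Int) + 1) 1).length = 5 * m := by
    rw [PySem.List.length_pyRange_one]; omega
  rw [hlen]
  rw [PySem.List.pyRange_of_pos 0 ((5 * m : Nat) : Int) (by norm_num)]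
  have hcount : (if (0 : Int) < ((5 * m : Nat) : Int)
      then ((((5 * m : Nat) : Int) - 0 + 5 - 1) / 5).toNat else 0) = m := by
    split_ifs with h <;> omega
  rw [hcount, List.map_map]
  refine List.map_congr_left (fun k hk => ?_)
  have hkm : k < m := List.mem_range.mp hk
  have h := slice_chunk m k hkm
  simp only [Function.comp_apply, Int.zero_add, pvChunk]
  exact h

lemma both_nil (n : Int) (hn : n ≤ 0) : group_of_5 n = group_of_5_alt n := by
  unfold group_of_5 group_of_5_alt pvChunksOf
  rw [PySem.List.pyRange_one_eq_nil hn,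
    PySem.List.pyRange_one_eq_nil (show 5 * n + 1 ≤ 1 by omega)]
  simp [PySem.List.pyRange]

-- ===== VERDICT (by name: the statement is the Claim_ definition above) =====
theorem group_of_5_spec : Claim_equal_group_of_5 := by
  intro n _
  unfold Spec_group_of_5
  rcases (by omega : n ≤ 0 ∨ 0 < n) with hn | hn
  · exact both_nil n hn
  · have h : n = (n.toNat : Int) := by omega
    rw [h, groupA_eq, groupB_eq]
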